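-- pv_equiv track=rewrite | github.com/facebookincubator/cinderx | cinderx/PythonLib/test_cinderx/cinder_mp_preload_helper_worker.py | churn
-- ===== SOURCE A (Python) =====
-- def churn(n: int) -> int:
--     funcs = []
--     for _ in range(n):
--
--         def inner(x: int = 0) -> int:
--             return x + 1
--
--         funcs.append(inner)
--     total = sum(f() for f in funcs)
--     del funcs
--     return total
-- ===== SOURCE B (Python) =====
-- def churn(n: int) -> int:
--     return max(n, 0)
-- ===== Notes on version B (the rewrite author's own statement) =====
-- stated objective: faster
-- what changed: A builds a list of n identical unit-valued closures and sums their calls; B returns the count of loop iterations directly as a closed form, clamping negative n to zero.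
import Mathlib
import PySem

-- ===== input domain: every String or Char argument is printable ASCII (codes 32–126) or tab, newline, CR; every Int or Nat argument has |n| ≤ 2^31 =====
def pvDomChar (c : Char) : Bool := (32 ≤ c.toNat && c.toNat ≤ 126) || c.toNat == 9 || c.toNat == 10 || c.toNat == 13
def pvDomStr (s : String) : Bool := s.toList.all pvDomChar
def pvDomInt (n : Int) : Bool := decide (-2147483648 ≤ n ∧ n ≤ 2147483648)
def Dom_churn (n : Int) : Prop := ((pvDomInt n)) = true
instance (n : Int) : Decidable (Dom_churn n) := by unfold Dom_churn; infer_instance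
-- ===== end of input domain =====

-- B replaces A's list of n closures summed by calls with the closed form max(n, 0): faster (O(1) vs O(n)).

-- ===== PORT A =====
-- the closure 'inner' captures nothing; each append adds the function x ↦ x + 1
def churn (n : Int) : Int :=
  let funcs : List (Int → Int) :=
    (PySem.List.pyRange 0 n 1).foldl (fun acc _ => acc ++ [fun (x : Int) => x + 1]) []
  funcs.foldl (fun total f => total + f 0) 0

-- ===== PORT B =====
def churn_alt (n : Int) : Int := max n 0

-- ===== PRECONDITION & SPEC =====
def Spec_churn (n : Int) (out : Int) : Prop := out = churn_alt n
instance (n : Int) (out : Int) : Decidable (Spec_churn n out) := by unfold Spec_churn; infer_instance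

-- ===== CLAIM (what is proved, stated in full; the proofs are below) =====
def Claim_equal_churn : Prop := ∀ (n : Int), Dom_churn n → Spec_churn n (churn n)

-- ===== LEMMAS AND PROOFS =====

-- building the closure list: the foldl appends one closure per range element
theorem churn_build (l : List Int) (acc : List (Int → Int)) :
    l.foldl (fun acc _ => acc ++ [fun (x : Int) => x + 1]) acc
      = acc ++ l.map (fun _ => fun (x : Int) => x + 1) := by
  induction l generalizing acc with
  | nil => simp
  | cons a t ih => simp [List.foldl, ih]

-- summing calls over a list of k copies of (·+1) gives init + k
theorem churn_sum (fs : List (Int → Int)) (init : Int)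
    (h : ∀ f ∈ fs, f 0 = 1) :
    fs.foldl (fun total f => total + f 0) init = init + fs.length := by
  induction fs generalizing init with
  | nil => simp
  | cons f t ih =>
      have hf : f 0 = 1 := h f (by simp)
      simp only [List.foldl, hf, List.length_cons]
      rw [ih _ (fun g hg => h g (by simp [hg]))]
      push_cast; ring

-- ===== VERDICT (by name: the statement is the Claim_ definition above) =====
theorem churn_spec : Claim_equal_churn := by
  intro n _
  unfold Spec_churn churn churn_alt
  rw [churn_build]
  rw [churn_sum _ _ (by intro f hf; simp at hf; rw [hf.2]; norm_num)]
  simp only [List.length_map, PySem.List.length_pyRange_one, List.length_append,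
    List.length_nil]
  omega
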